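-- pv_equiv track=rewrite | github.com/juanjuanShu/codes | apriori.py | create_C1
-- ===== SOURCE A (Python) =====
-- def create_C1(data_set):
--     temp1 = set()
--     C1 = {}
--
--     for t in data_set:
--         for item in t:
--             temp1.add(item)
--
--     list1 = list(temp1)
--     #按照字典序排序
--     list1.sort()
--     C1 = C1.fromkeys(list1,0)
--     for t in data_set:
--         for item in t:
--             C1[item] += 1
--
--     return C1
-- ===== SOURCE B (Python) =====
-- def create_C1(data_set):
--     # sort ALL item occurrences (with duplicates), then run-length encode:
--     # each maximal run of equal adjacent items gives one (item, run length) entry,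
--     # and runs appear in sorted key order, so the dict is built in sorted order.
--     items = sorted(item for t in data_set for item in t)
--     result = {}
--     i = 0
--     n = len(items)
--     while i < n:
--         j = i + 1
--         while j < n and items[j] == items[i]:
--             j += 1
--         result[items[i]] = j - i
--         i = j
--     return result
-- ===== Notes on version B (the rewrite author's own statement) =====
-- stated objective: alternative
-- what changed: Instead of collecting a set, sorting the distinct keys and counting into a zero-initialised dict in a second nested pass, B sorts the full multiset of item occurrences once and run-length-encodes the sorted list in a single linear scan, with no set and no dict counting at all.
import Mathlib
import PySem

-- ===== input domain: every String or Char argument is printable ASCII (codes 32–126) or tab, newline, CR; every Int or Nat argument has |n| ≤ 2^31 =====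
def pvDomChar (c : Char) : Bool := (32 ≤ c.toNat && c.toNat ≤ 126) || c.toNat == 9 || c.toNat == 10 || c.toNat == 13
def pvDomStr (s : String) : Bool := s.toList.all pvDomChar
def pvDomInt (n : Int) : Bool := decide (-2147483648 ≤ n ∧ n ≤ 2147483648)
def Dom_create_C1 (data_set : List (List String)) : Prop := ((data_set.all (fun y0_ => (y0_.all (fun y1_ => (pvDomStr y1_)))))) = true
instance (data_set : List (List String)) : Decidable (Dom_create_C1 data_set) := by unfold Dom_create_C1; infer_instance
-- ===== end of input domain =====

-- B sorts the full multiset of occurrences once and run-length-encodes the sorted list in one scan;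
-- A collects a set, sorts the distinct keys and counts into a zero-initialised dict in a second nested pass.


-- ===== PORT A =====
def create_C1 (data_set : List (List String)) : List (String × Int) :=
  let temp1 : PySem.Set String :=
    data_set.foldl (fun s t => t.foldl (fun s item => PySem.Set.add s item) s) PySem.Set.empty
  let list1 := PySem.List.sorted temp1 (fun x => x) false
  let C1 : PySem.Dict String Int :=
    list1.foldl (fun d k => d.insert k (0 : Int)) PySem.Dict.empty
  let C1' :=
    data_set.foldl (fun d t => t.foldl (fun d item => d.modify item 0 (· + 1)) d) C1
  C1'.items

-- ===== PORT B =====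
-- the inner while loop "advance j while items[j] == items[i]" is the span of the run;
-- the outer while loop is the recursion on the remaining suffix
def runLenB (items : List String) : List (String × Int) :=
  match items with
  | [] => []
  | x :: rest =>
    (x, 1 + (rest.takeWhile (· == x)).length) :: runLenB (rest.dropWhile (· == x))
termination_by items.length
decreasing_by
  simp only [List.length_cons]
  exact Nat.lt_succ_of_le (List.length_dropWhile_le _ _)

def create_C1_alt (data_set : List (List String)) : List (String × Int) :=
  runLenB (PySem.List.sorted (data_set.flatMap (fun t => t)) (fun x => x) false)

-- ===== PRECONDITION & SPEC =====
def Spec_create_C1 (data_set : List (List String)) (out : List (String × Int)) : Prop := out = create_C1_alt data_set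
instance (data_set : List (List String)) (out : List (String × Int)) : Decidable (Spec_create_C1 data_set out) := by unfold Spec_create_C1; infer_instance

-- ===== CLAIM (what is proved, stated in full; the proofs are below) =====
def Claim_equal_create_C1 : Prop := ∀ (data_set : List (List String)), Dom_create_C1 data_set → Spec_create_C1 data_set (create_C1 data_set)

-- ===== LEMMAS AND PROOFS =====

-- fromkeys(_, 0): every lookup with default 0 yields 0
lemma getD_foldl_insert_zero (l : List String) (d : PySem.Dict String Int)
    (h : ∀ k, d.getD k 0 = 0) (k : String) :
    (l.foldl (fun d k => d.insert k (0 : Int)) d).getD k 0 = 0 := by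
  induction l generalizing d with
  | nil => exact h k
  | cons x xs ih =>
    refine ih _ (fun k' => ?_)
    rw [PySem.Dict.getD_insert]
    split_ifs <;> [rfl; exact h k']

-- A's two passes over the flattened items: sorted distinct items, each with its count
lemma itemsA (L : List String) :
    (L.foldl (fun d item => d.modify item 0 (· + 1))
       ((PySem.List.sorted (PySem.Set.ofList L) (fun x => x) false).foldl
          (fun d k => d.insert k (0 : Int)) PySem.Dict.empty)).items
    = (PySem.List.sorted (PySem.Set.ofList L) (fun x => x) false).map
        (fun k => (k, (L.count k : Int))) := by
  have hperm : (PySem.List.sorted (PySem.Set.ofList L) (fun x => x) false).Perm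
      (PySem.Set.ofList L) := PySem.List.sorted_perm _ _ _
  set list1 := PySem.List.sorted (PySem.Set.ofList L) (fun x => x) false with hlist1
  have hnd : list1.Nodup := hperm.nodup_iff.mpr (PySem.Set.nodup_ofList L)
  have hmem : ∀ x, x ∈ list1 ↔ x ∈ L := fun x => by
    rw [hperm.mem_iff]; exact PySem.Set.mem_ofList _ _
  have hkeysC1 : (list1.foldl (fun d k => d.insert k (0 : Int)) PySem.Dict.empty).keys
      = list1 := by
    rw [PySem.Dict.keys_foldl_insert, PySem.Dict.keys_empty, PySem.Set.update_nil_left]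
    exact PySem.Set.ofList_eq_self_of_nodup list1 hnd
  have hkeysD : (L.foldl (fun d item => d.modify item 0 (· + 1))
      (list1.foldl (fun d k => d.insert k (0 : Int)) PySem.Dict.empty)).keys = list1 := by
    rw [PySem.Dict.keys_foldl_modify, hkeysC1, PySem.Set.update_eq_append_filter]
    have hfil : (PySem.Set.ofList L).filter (fun y => !(PySem.Set.contains list1 y)) = [] := by
      apply List.filter_eq_nil_iff.mpr
      intro y hy
      simp only [Bool.not_eq_true', Bool.not_eq_false]
      exact (PySem.Set.contains_iff list1 y).mpr ((hmem y).mpr ((PySem.Set.mem_ofList _ _).mp hy))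
    rw [hfil, List.append_nil]
  have hndD : (L.foldl (fun d item => d.modify item 0 (· + 1))
      (list1.foldl (fun d k => d.insert k (0 : Int)) PySem.Dict.empty)).keys.Nodup := by
    rw [hkeysD]; exact hnd
  rw [PySem.Dict.items_eq_map_keys _ hndD 0, hkeysD]
  refine List.map_congr_left (fun k _ => ?_)
  rw [PySem.Dict.getD_foldl_modify_add_one,
    getD_foldl_insert_zero list1 _ (fun k => PySem.Dict.getD_empty k 0) k, zero_add]

lemma create_C1_eq (ds : List (List String)) :
    create_C1 ds = (PySem.List.sorted (PySem.Set.ofList ds.flatten) (fun x => x) false).map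
      (fun k => (k, (ds.flatten.count k : Int))) := by
  simp only [create_C1, ← List.foldl_flatten]
  exact itemsA ds.flatten

-- elements after dropping the leading run of x are strictly greater than x, on a sorted list
lemma mem_dropWhile_gt (x : String) (S : List String)
    (hs : S.Pairwise (· ≤ ·)) (hall : ∀ y ∈ S, x ≤ y) :
    ∀ y ∈ S.dropWhile (· == x), x < y := by
  induction S with
  | nil => simp
  | cons a t ih =>
    rw [List.pairwise_cons] at hs
    by_cases hax : a = x
    · subst hax
      rw [List.dropWhile_cons_of_pos (by simp)]
      exact ih hs.2 (fun y hy => hs.1 y hy)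
    · rw [List.dropWhile_cons_of_neg (by simpa using hax)]
      intro y hy
      have hxa : x < a := lt_of_le_of_ne (hall a (by simp)) (fun h => hax h.symm)
      rcases List.mem_cons.mp hy with rfl | hyt
      · exact hxa
      · exact lt_of_lt_of_le hxa (hs.1 y hyt)

-- run-length encoding of a sorted list: strictly increasing keys, same members, exact counts
lemma runLenB_spec (S : List String) (hs : S.Pairwise (· ≤ ·)) :
    ((runLenB S).map Prod.fst).Pairwise (· < ·) ∧
    (∀ x, x ∈ (runLenB S).map Prod.fst ↔ x ∈ S) ∧
    (∀ p ∈ runLenB S, p.2 = (S.count p.1 : Int)) := by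
  induction S using runLenB.induct with
  | case1 => simp [runLenB]
  | case2 x rest ih =>
    rw [List.pairwise_cons] at hs
    have hsrest := hs.2
    have hall : ∀ y ∈ rest, x ≤ y := hs.1
    have hdrop := mem_dropWhile_gt x rest hsrest hall
    have hsd : (rest.dropWhile (· == x)).Pairwise (· ≤ ·) := hsrest.sublist (List.dropWhile_sublist _)
    obtain ⟨ihp, ihm, ihc⟩ := ih hsd
    have hspan : rest.takeWhile (· == x) ++ rest.dropWhile (· == x) = rest :=
      List.takeWhile_append_dropWhile
    have htake : ∀ y ∈ rest.takeWhile (· == x), y = x := by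
      intro y hy
      simpa using List.mem_takeWhile_imp hy
    refine ⟨?_, ?_, ?_⟩
    · rw [runLenB]
      simp only [List.map_cons, List.pairwise_cons]
      exact ⟨fun b hb => hdrop b ((ihm b).mp hb), ihp⟩
    · intro y
      rw [runLenB]
      simp only [List.map_cons, List.mem_cons, ihm]
      constructor
      · rintro (rfl | hy)
        · simp
        · exact Or.inr ((List.dropWhile_sublist _).subset hy)
      · rintro (rfl | hy)
        · exact Or.inl rfl
        · rw [← hspan] at hy
          rcases List.mem_append.mp hy with h1 | h2
          · exact Or.inl (htake y h1)
          · exact Or.inr h2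
    · intro p hp
      rw [runLenB] at hp
      rcases List.mem_cons.mp hp with rfl | hp'
      · have h1 : (rest.takeWhile (· == x)).count x = (rest.takeWhile (· == x)).length :=
          List.count_eq_length.mpr (fun y hy => ((htake y hy) ▸ rfl : x = y))
        have h2 : (rest.dropWhile (· == x)).count x = 0 :=
          List.count_eq_zero.mpr (fun hmem => lt_irrefl x (hdrop x hmem))
        have hsplit : rest.count x
            = (rest.takeWhile (· == x)).count x + (rest.dropWhile (· == x)).count x := by
          rw [← List.count_append, hspan]
        have hcx : (x :: rest).count x = 1 + (rest.takeWhile (· == x)).length := by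
          rw [List.count_cons_self]
          omega
        simp [hcx]
      · have hgt : x < p.1 := hdrop p.1 ((ihm p.1).mp (List.mem_map_of_mem hp'))
        rw [ihc p hp']
        have htk : (rest.takeWhile (· == x)).count p.1 = 0 :=
          List.count_eq_zero.mpr (fun hmem => (ne_of_gt hgt) (htake _ hmem))
        have hsplit : rest.count p.1
            = (rest.takeWhile (· == x)).count p.1 + (rest.dropWhile (· == x)).count p.1 := by
          rw [← List.count_append, hspan]
        have hcount : (x :: rest).count p.1 = (rest.dropWhile (· == x)).count p.1 := by
          rw [List.count_cons_of_ne (ne_of_lt hgt)]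
          omega
        rw [hcount]

lemma create_C1_alt_eq (ds : List (List String)) :
    create_C1_alt ds = (PySem.List.sorted (PySem.Set.ofList ds.flatten) (fun x => x) false).map
      (fun k => (k, (ds.flatten.count k : Int))) := by
  have hflat : ds.flatMap (fun t => t) = ds.flatten := by simp
  unfold create_C1_alt
  rw [hflat]
  set L := ds.flatten with hL
  set S := PySem.List.sorted L (fun x => x) false with hS
  have hs : S.Pairwise (· ≤ ·) := PySem.List.sorted_pairwise L (fun x => x)
  obtain ⟨hp, hm, hc⟩ := runLenB_spec S hs
  have hpermSL : S.Perm L := PySem.List.sorted_perm _ _ _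
  have hfst : PySem.List.sorted (PySem.Set.ofList L) (fun x => x) false
      = (runLenB S).map Prod.fst := by
    apply PySem.List.sorted_eq_of_perm_of_pairwise_lt
    · rw [List.perm_ext_iff_of_nodup (hp.imp ne_of_lt) (PySem.Set.nodup_ofList L)]
      intro x
      rw [hm x, hpermSL.mem_iff, PySem.Set.mem_ofList]
    · exact hp
  rw [hfst, List.map_map]
  have hmapid : List.map ((fun k => (k, (L.count k : Int))) ∘ Prod.fst) (runLenB S)
      = (runLenB S).map id := by
    apply List.map_congr_left
    intro p hp'
    obtain ⟨a, b⟩ := p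
    have h2 := hc (a, b) hp'
    simp only at h2
    simp only [Function.comp, id_eq]
    rw [h2, hpermSL.count_eq a]
  rw [hmapid, List.map_id]

-- ===== VERDICT (by name: the statement is the Claim_ definition above) =====
theorem create_C1_spec : Claim_equal_create_C1 := by
  intro ds _
  unfold Spec_create_C1
  rw [create_C1_eq, create_C1_alt_eq]
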